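-- pv_equiv track=rewrite | github.com/t1ooo/geeksforgeeks | given-a-number-find-next-sparse-number/main.py | nextSparseV3
-- ===== SOURCE A (Python) =====
-- def nextSparseV3(n):
--     def isSparse(n):
--         if n & (n << 1) == 0:
--             return True
--         return False
--
--     while not isSparse(n):
--         n += 1
--
--     return n
-- ===== SOURCE B (Python) =====
-- def nextSparseV3(n):
--     # Single upward bit-scan: round up past each adjacent-1 pair; O(log n) arithmetic.
--     if n <= 0:
--         return 0
--     p = 1
--     while p <= n:
--         if (n // p) % 4 == 3:          # bits at p and 2p are both set
--             n = (n // (4 * p) + 1) * (4 * p)   # round up to next multiple of 4p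
--             p = 4 * p                  # bits below 4p are now zero
--         else:
--             p = 2 * p
--     return n
-- ===== Notes on version B (the rewrite author's own statement) =====
-- stated objective: faster
-- what changed: A increments n by 1 and re-tests sparseness until it hits a sparse number; B does a single upward bit-scan, rounding n up past each adjacent-1 bit pair (clearing the bits below it), so it never visits intermediate numbers.
import Mathlib
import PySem

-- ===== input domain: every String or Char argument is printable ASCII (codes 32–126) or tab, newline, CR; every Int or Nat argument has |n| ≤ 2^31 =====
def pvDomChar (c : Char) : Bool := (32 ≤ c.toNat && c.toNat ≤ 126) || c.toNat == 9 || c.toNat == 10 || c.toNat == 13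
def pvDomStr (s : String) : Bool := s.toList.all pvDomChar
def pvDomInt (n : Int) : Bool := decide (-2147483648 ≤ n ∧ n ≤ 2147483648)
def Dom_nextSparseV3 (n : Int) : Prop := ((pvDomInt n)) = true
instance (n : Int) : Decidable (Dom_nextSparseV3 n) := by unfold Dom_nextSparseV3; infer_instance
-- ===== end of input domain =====

-- B replaces A's unit-step search with a single upward bit-scan that rounds past each
-- adjacent-1 pair (objective: faster).

-- ===== PORT A =====
/-- A's inner helper `isSparse`: `n & (n << 1) == 0`. -/
def isSparseA (n : Int) : Bool := PySem.Int.band n (n <<< (1 : Nat)) == 0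

/-- A's `while not isSparse(n): n += 1`, made structural with a fuel that merely bounds
    the iteration count (a sparse number is always reached within `n.natAbs + 1` steps,
    proved below); the computation is the same unit-step search. -/
def goA : Nat → Int → Int
  | 0, n => n
  | f + 1, n => if isSparseA n then n else goA f (n + 1)

def nextSparseV3 (n : Int) : Int := goA (n.natAbs + 1) n

-- ===== PORT B =====
/-- B's scan loop `while p <= n: …` (state `(n, p)`), made structural with a fuel that
    merely bounds the iteration count (`p` at least doubles each pass, proved below). -/
def goB : Nat → Int → Int → Int
  | 0, n, _ => n
  | f + 1, n, p =>
    if p ≤ n then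
      if PySem.Int.mod (PySem.Int.floordiv n p) 4 == 3 then
        goB f ((PySem.Int.floordiv n (4 * p) + 1) * (4 * p)) (4 * p)
      else
        goB f n (2 * p)
    else n

def nextSparseV3_alt (n : Int) : Int :=
  if n ≤ 0 then 0 else goB (n.natAbs + 2) n 1

-- ===== PRECONDITION & SPEC =====
def Spec_nextSparseV3 (n : Int) (out : Int) : Prop := out = nextSparseV3_alt n
instance (n : Int) (out : Int) : Decidable (Spec_nextSparseV3 n out) := by unfold Spec_nextSparseV3; infer_instance

-- ===== CLAIM (what is proved, stated in full; the proofs are below) =====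
def Claim_equal_nextSparseV3 : Prop := ∀ (n : Int), Dom_nextSparseV3 n → Spec_nextSparseV3 n (nextSparseV3 n)

-- ===== LEMMAS AND PROOFS =====

/-- `m` has the adjacent set bits `i` and `i+1`. -/
def Pair (m i : Nat) : Prop := m / 2 ^ i % 4 = 3

lemma pair_iff_testBit (m i : Nat) :
    Pair m i ↔ (m.testBit i = true ∧ m.testBit (i + 1) = true) := by
  unfold Pair
  rw [Nat.testBit_eq_decide_div_mod_eq, Nat.testBit_eq_decide_div_mod_eq]
  have h : m / 2 ^ (i + 1) = m / 2 ^ i / 2 := by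
    rw [Nat.pow_succ, ← Nat.div_div_eq_div_mul]
  rw [h]
  simp only [decide_eq_true_eq]
  omega

/-- `m & (2*m) == 0` says exactly: no adjacent set bits. -/
lemma band_eq_zero_iff (m : Nat) : m &&& 2 * m = 0 ↔ ∀ i, ¬ Pair m i := by
  constructor
  · intro h i hp
    obtain ⟨h1, h2⟩ := (pair_iff_testBit m i).1 hp
    have hb : (m &&& 2 * m).testBit (i + 1) = true := by
      rw [Nat.testBit_land, h2, Nat.testBit_add_one, Nat.mul_div_cancel_left _ (by norm_num), h1]
      rfl
    rw [h, Nat.zero_testBit] at hb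
    exact absurd hb (by simp)
  · intro h
    apply Nat.eq_of_testBit_eq
    intro j
    rw [Nat.testBit_land, Nat.zero_testBit]
    cases j with
    | zero =>
      have : (2 * m).testBit 0 = false := by
        rw [Nat.testBit_eq_decide_div_mod_eq]
        simp [Nat.mul_mod_right]
      simp [this]
    | succ i =>
      have h2 : (2 * m).testBit (i + 1) = m.testBit i := by
        rw [Nat.testBit_add_one, Nat.mul_div_cancel_left _ (by norm_num)]
      rw [h2]
      cases hti : m.testBit i with
      | false => simp
      | true =>
        cases hti1 : m.testBit (i + 1) with
        | false => simp
        | true => exact absurd ((pair_iff_testBit m i).2 ⟨hti, hti1⟩) (h i)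

lemma two_pow_sparse (t : Nat) : 2 ^ t &&& 2 * 2 ^ t = 0 := by
  have h : 2 * 2 ^ t = 2 ^ (t + 1) := by ring
  rw [h]
  apply Nat.eq_of_testBit_eq
  intro i
  rw [Nat.testBit_land, Nat.zero_testBit, Nat.testBit_two_pow, Nat.testBit_two_pow]
  simp only [Bool.and_eq_false_iff, decide_eq_false_iff_not]
  omega

lemma isSparseA_natCast (m : Nat) : isSparseA (m : Int) = true ↔ m &&& 2 * m = 0 := by
  unfold isSparseA
  have h1 : ((m : Int) <<< (1 : Nat)) = ((m <<< 1 : Nat) : Int) := rfl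
  rw [h1, PySem.Int.band_natCast]
  rw [Nat.shiftLeft_eq, pow_one, Nat.mul_comm m 2]
  simp

lemma isSparseA_neg (n : Int) (h : n < 0) : isSparseA n = false := by
  unfold isSparseA
  have h2 : (n <<< (1 : Nat)) = 2 * n := by rw [Int.shiftLeft_eq]; ring
  rw [h2]
  have hn2 : ¬ (0 : Int) ≤ 2 * n := by omega
  have hn : ¬ (0 : Int) ≤ n := by omega
  simp only [PySem.Int.band, if_neg hn, if_neg hn2]
  simp only [beq_eq_false_iff_ne, ne_eq]
  intro hc
  omega

/-- A's loop returns `n + k` when `n + k` is the first sparse value at or above `n`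
    (and the fuel is at least `k`). -/
lemma goA_eq (f : Nat) : ∀ (n : Int) (k : Nat), k ≤ f →
    isSparseA (n + k) = true →
    (∀ j : Nat, j < k → isSparseA (n + j) = false) →
    goA f n = n + k := by
  induction f with
  | zero =>
    intro n k hk hs _
    interval_cases k
    simp [goA]
  | succ f ih =>
    intro n k hk hs hmin
    unfold goA
    cases k with
    | zero =>
      rw [if_pos (by simpa using hs)]
      simp
    | succ k' =>
      have h0 : isSparseA n = false := by simpa using hmin 0 (by omega)
      rw [if_neg (by simp [h0])]
      have := ih (n + 1) k' (by omega)
        (by rw [show n + 1 + (k' : Int) = n + (k' + 1 : Nat) by push_cast; ring]; exact hs)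
        (fun j hj => by
          rw [show n + 1 + (j : Int) = n + (j + 1 : Nat) by push_cast; ring]
          exact hmin (j + 1) (by omega))
      rw [this]
      push_cast
      ring

lemma lt_round (m P : Nat) (hP : 0 < P) : m < (m / P + 1) * P :=
  (Nat.div_lt_iff_lt_mul hP).1 (Nat.lt_succ_self _)

/-- Rounding past the adjacent pair at bit `j` skips no sparse number: everything
    in `[m, (m / 2^(j+2) + 1) * 2^(j+2))` still has the pair at bit `j`. -/
lemma pair_of_between (m j x : Nat) (hp : Pair m j) (h1 : m ≤ x)
    (h2 : x < (m / 2 ^ (j + 2) + 1) * 2 ^ (j + 2)) : Pair x j := by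
  unfold Pair at *
  have hK : 0 < 2 ^ j := Nat.two_pow_pos j
  have hP : (2 : Nat) ^ (j + 2) = 2 ^ j * 4 := by rw [pow_add]; norm_num
  have hdd : m / 2 ^ (j + 2) = m / 2 ^ j / 4 := by
    rw [hP, ← Nat.div_div_eq_div_mul]
  have hy1 : m / 2 ^ j ≤ x / 2 ^ j := Nat.div_le_div_right h1
  have hy2 : x / 2 ^ j < (m / 2 ^ j / 4 + 1) * 4 := by
    rw [Nat.div_lt_iff_lt_mul hK]
    calc x < (m / 2 ^ (j + 2) + 1) * 2 ^ (j + 2) := h2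
      _ = (m / 2 ^ j / 4 + 1) * 4 * 2 ^ j := by rw [hdd, hP]; ring
  omega

/-- After rounding to a multiple of `2^(j+2)`, there is no adjacent pair below bit `j+2`. -/
lemma no_low_pair (c j t : Nat) (ht : t < j + 2) : ¬ Pair (c * 2 ^ (j + 2)) t := by
  unfold Pair
  have hsplit : (2 : Nat) ^ (j + 2) = 2 ^ t * 2 ^ (j + 2 - t) := by
    rw [← pow_add]
    congr 1
    omega
  have hdiv : c * 2 ^ (j + 2) / 2 ^ t = c * 2 ^ (j + 2 - t) := by
    have h2 : c * 2 ^ (j + 2) = 2 ^ t * (c * 2 ^ (j + 2 - t)) := by rw [hsplit]; ring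
    rw [h2, Nat.mul_div_cancel_left _ (Nat.two_pow_pos t)]
  rw [hdiv]
  rcases Nat.lt_or_ge (j + 2 - t) 2 with he | he
  · have h1 : j + 2 - t = 1 := by omega
    rw [h1, pow_one]
    omega
  · have : ∃ e, j + 2 - t = e + 2 := ⟨j - t, by omega⟩
    obtain ⟨e, hee⟩ := this
    rw [hee]
    have : c * 2 ^ (e + 2) = 4 * (c * 2 ^ e) := by ring
    rw [this]
    omega

/-- B's scan loop computes the least sparse number `s ≥ m`, given that all adjacent
    pairs below bit `j` are already clear and the fuel dominates `log2 s - j`. -/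
lemma goB_eq (f : Nat) : ∀ (m j s : Nat),
    0 < m → m ≤ s → s &&& 2 * s = 0 →
    (∀ x, m ≤ x → x < s → ¬ (x &&& 2 * x = 0)) →
    (∀ t, t < j → ¬ Pair m t) →
    s < 2 ^ (j + f) →
    goB f (m : Int) ((2 ^ j : Nat) : Int) = (s : Int) := by
  have sparse_here : ∀ (m j s : Nat), m ≤ s → s &&& 2 * s = 0 →
      (∀ x, m ≤ x → x < s → ¬ (x &&& 2 * x = 0)) →
      (∀ t, t < j → ¬ Pair m t) → m < 2 ^ j → m = s := by
    intro m j s hms hs hmin hinv hlt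
    have hsp : m &&& 2 * m = 0 := by
      rw [band_eq_zero_iff]
      intro t
      rcases Nat.lt_or_ge t j with h | h
      · exact hinv t h
      · unfold Pair
        have : m / 2 ^ t = 0 :=
          Nat.div_eq_of_lt (lt_of_lt_of_le hlt (Nat.pow_le_pow_right (by norm_num) h))
        rw [this]
        omega
    by_contra hne
    exact hmin m (le_refl m) (by omega) hsp
  induction f with
  | zero =>
    intro m j s hm hms hs hmin hinv hf
    simp only [goB]
    have : m = s := sparse_here m j s hms hs hmin hinv (lt_of_le_of_lt hms (by simpa using hf))
    exact_mod_cast this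
  | succ f ih =>
    intro m j s hm hms hs hmin hinv hf
    unfold goB
    by_cases hc : ((2 ^ j : Nat) : Int) ≤ (m : Int)
    · rw [if_pos hc]
      have hjm : 2 ^ j ≤ m := by exact_mod_cast hc
      have hfd : PySem.Int.floordiv (m : Int) ((2 ^ j : Nat) : Int) = ((m / 2 ^ j : Nat) : Int) :=
        PySem.Int.floordiv_natCast m (2 ^ j)
      have h4 : (4 : Int) = ((4 : Nat) : Int) := by norm_num
      by_cases hp : Pair m j
      · have htest : (PySem.Int.mod (PySem.Int.floordiv (m : Int) ((2 ^ j : Nat) : Int)) 4 == 3) = true := by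
          rw [hfd, h4, PySem.Int.mod_natCast]
          unfold Pair at hp
          rw [hp]
          rfl
        rw [if_pos htest]
        have hP4 : (4 : Int) * ((2 ^ j : Nat) : Int) = ((2 ^ (j + 2) : Nat) : Int) := by
          push_cast [pow_add]
          ring
        have hP0 : 0 < 2 ^ (j + 2) := Nat.two_pow_pos _
        set m' := (m / 2 ^ (j + 2) + 1) * 2 ^ (j + 2) with hm'
        have harg : (PySem.Int.floordiv (m : Int) (4 * ((2 ^ j : Nat) : Int)) + 1) * (4 * ((2 ^ j : Nat) : Int))
            = ((m' : Nat) : Int) := by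
          rw [hP4, PySem.Int.floordiv_natCast]
          rw [hm']
          push_cast
          ring
        have hmm' : m < m' := lt_round m _ hP0
        have hsm' : m' ≤ s := by
          by_contra hlt
          push Not at hlt
          have hps : Pair s j := pair_of_between m j s hp hms hlt
          have : ¬ (s &&& 2 * s = 0) := by
            intro h0
            exact ((band_eq_zero_iff s).1 h0 j) hps
          exact this hs
        have := ih m' (j + 2) s (by positivity) hsm' hs
          (fun x hx1 hx2 => hmin x (le_trans (le_of_lt hmm') hx1) hx2)
          (fun t ht => no_low_pair _ j t ht)
          (by
            have : (2:Nat) ^ (j + (f + 1)) ≤ 2 ^ (j + 2 + f) := Nat.pow_le_pow_right (by norm_num) (by omega)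
            omega)
        rw [harg, hP4, this]
      · have htest : (PySem.Int.mod (PySem.Int.floordiv (m : Int) ((2 ^ j : Nat) : Int)) 4 == 3) = false := by
          rw [hfd, h4, PySem.Int.mod_natCast]
          simp only [beq_eq_false_iff_ne, ne_eq]
          intro hcontra
          exact hp (by exact_mod_cast hcontra)
        rw [if_neg (by rw [htest]; exact Bool.false_ne_true)]
        have hP2 : (2 : Int) * ((2 ^ j : Nat) : Int) = ((2 ^ (j + 1) : Nat) : Int) := by
          push_cast [pow_add]
          ring
        have := ih m (j + 1) s hm hms hs hmin
          (fun t ht => by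
            rcases Nat.lt_or_ge t j with h | h
            · exact hinv t h
            · have : t = j := by omega
              rw [this]
              exact hp)
          (by
            have h1 : j + 1 + f = j + (f + 1) := by omega
            rw [h1]
            exact hf)
        rw [hP2, this]
    · rw [if_neg hc]
      have hjm : m < 2 ^ j := by
        have : ¬ ((2 ^ j : Nat) ≤ m) := fun h => hc (by exact_mod_cast h)
        omega
      have : m = s := sparse_here m j s hms hs hmin hinv hjm
      exact_mod_cast this

theorem nextSparseV3_spec : Claim_equal_nextSparseV3 := by
  intro n _
  unfold Spec_nextSparseV3 nextSparseV3 nextSparseV3_alt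
  by_cases hn : n ≤ 0
  · rw [if_pos hn]
    have h0 : n + (n.natAbs : Int) = 0 := by omega
    have := goA_eq (n.natAbs + 1) n n.natAbs (by omega)
      (by rw [h0]; decide)
      (fun j hj => isSparseA_neg _ (by omega))
    rw [this, h0]
  · rw [if_neg hn]
    push Not at hn
    obtain ⟨m, hm⟩ : ∃ m : Nat, n = (m : Int) := ⟨n.toNat, by omega⟩
    subst hm
    have hm0 : 0 < m := by exact_mod_cast hn
    -- the least sparse number ≥ m, via Nat.find
    have hex : ∃ k, (m + k) &&& 2 * (m + k) = 0 := by
      refine ⟨2 ^ (Nat.log2 m + 1) - m, ?_⟩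
      have hlt : m < 2 ^ (Nat.log2 m + 1) := Nat.lt_log2_self
      rw [show m + (2 ^ (Nat.log2 m + 1) - m) = 2 ^ (Nat.log2 m + 1) by omega]
      exact two_pow_sparse _
    set k0 := Nat.find hex with hk0
    have hk0s : (m + k0) &&& 2 * (m + k0) = 0 := Nat.find_spec hex
    have hk0min : ∀ j, j < k0 → ¬ ((m + j) &&& 2 * (m + j) = 0) := fun j hj => Nat.find_min hex hj
    have hk0le : k0 ≤ m := by
      have hwit : (m + (2 ^ (Nat.log2 m + 1) - m)) &&& 2 * (m + (2 ^ (Nat.log2 m + 1) - m)) = 0 := by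
        have hlt : m < 2 ^ (Nat.log2 m + 1) := Nat.lt_log2_self
        rw [show m + (2 ^ (Nat.log2 m + 1) - m) = 2 ^ (Nat.log2 m + 1) by omega]
        exact two_pow_sparse _
      have h1 : k0 ≤ 2 ^ (Nat.log2 m + 1) - m := Nat.find_min' hex hwit
      have h2 : 2 ^ (Nat.log2 m + 1) ≤ 2 * m := by
        rw [Nat.pow_succ]
        have := Nat.log2_self_le (by omega : m ≠ 0)
        omega
      omega
    have hA : goA ((m : Int).natAbs + 1) (m : Int) = ((m + k0 : Nat) : Int) := by
      have := goA_eq ((m : Int).natAbs + 1) (m : Int) k0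
        (by simp [Int.natAbs_natCast]; omega)
        (by rw [show (m : Int) + (k0 : Int) = ((m + k0 : Nat) : Int) by push_cast; ring]
            exact (isSparseA_natCast _).2 hk0s)
        (fun j hj => by
          rw [show (m : Int) + (j : Int) = ((m + j : Nat) : Int) by push_cast; ring]
          rcases Bool.eq_false_or_eq_true (isSparseA ((m + j : Nat) : Int)) with h | h
          · exact absurd ((isSparseA_natCast _).1 h) (hk0min j hj)
          · exact h)
      rw [this]
      push_cast
      ring
    have hB : goB ((m : Int).natAbs + 2) (m : Int) 1 = ((m + k0 : Nat) : Int) := by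
      have h1 : (1 : Int) = ((2 ^ 0 : Nat) : Int) := by norm_num
      rw [h1]
      apply goB_eq ((m : Int).natAbs + 2) m 0 (m + k0) hm0 (by omega) hk0s
      · intro x hx1 hx2
        have := hk0min (x - m) (by omega)
        rw [show m + (x - m) = x by omega] at this
        exact this
      · intro t ht
        omega
      · have hmp : m < 2 ^ m := Nat.lt_two_pow_self
        have h2 : (2:Nat) ^ (m + 1) ≤ 2 ^ (0 + ((m : Int).natAbs + 2)) := by
          apply Nat.pow_le_pow_right (by norm_num)
          simp [Int.natAbs_natCast]
        have h3 : m + k0 < 2 ^ (m + 1) := by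
          have : (2:Nat) ^ (m+1) = 2 * 2^m := by ring
          omega
        omega
    rw [hA, hB]
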